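-- pv_equiv track=rewrite | github.com/sheffieldnlp/cwi | src/features/NGram_char_features.py | getCorpusCharNgramsFromTarget
-- ===== SOURCE A (Python) =====
-- from collections import Counter
--
-- def normalizeWord(word):
--     result = word.lower()
--     return result
--
-- def getNGramsPrefixesSuffixes(token, index, N):
--     if index == 0:
--         result = ["PREFIX|__|" + token[ index : index + N ], "AFFIX|__|"+token[ index : index + N ]]
--     elif index == len(token) - N:
--         result = ["SUFFIX|__|" + token[ index : index + N ], "AFFIX|__|"+token[ index : index + N ]]
--     else:
--         result = ["AFFIX|__|"+ token[ index : index + N ]]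
--     return result
--
-- def getCharacterNgrams(token, N):
--     word = normalizeWord(token)
--     char_ngrams = Counter()
--     for i in range(len(word) - N + 1):
--         char_ngrams.update(getNGramsPrefixesSuffixes(word, i, N))
--     return char_ngrams
--
-- def getCorpusCharNgramsFromTarget(target, corpus_NGram_counts):
--     # For different values of N:
--     ngram_counts = Counter()
--
--     tokens = target.split(' ')
--     num_tokens = len(tokens)
--     if num_tokens == 1:
--         word = normalizeWord(tokens[0])
--         all_ngrams = []
--         for N, ngrams_ in corpus_NGram_counts.items():
--             word_ngrams = getCharacterNgrams(word, N)
--             for word_ngram in word_ngrams: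
--                 if word_ngram in ngrams_:
--                     all_ngrams.append(word_ngram)
--         ngram_counts.update(all_ngrams)
--     else:
--         for token in tokens:
--             ngram_counts.update(getCorpusCharNgramsFromTarget(token, corpus_NGram_counts))
--
--
--     return ngram_counts
-- ===== SOURCE B (Python) =====
-- from collections import Counter
--
-- def normalizeWord(word):
--     result = word.lower()
--     return result
--
-- def getNGramsPrefixesSuffixes(token, index, N):
--     if index == 0:
--         result = ["PREFIX|__|" + token[ index : index + N ], "AFFIX|__|"+token[ index : index + N ]]
--     elif index == len(token) - N:
--         result = ["SUFFIX|__|" + token[ index : index + N ], "AFFIX|__|"+token[ index : index + N ]]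
--     else:
--         result = ["AFFIX|__|"+ token[ index : index + N ]]
--     return result
--
-- def getCharacterNgrams(token, N):
--     word = normalizeWord(token)
--     char_ngrams = Counter()
--     for i in range(len(word) - N + 1):
--         char_ngrams.update(getNGramsPrefixesSuffixes(word, i, N))
--     return char_ngrams
--
-- def getCorpusCharNgramsFromTarget(target, corpus_NGram_counts):
--     # One flat iterative pass: no recursion, no per-token Counter merging.
--     ngram_counts = Counter()
--     for token in target.split(' '):
--         word = normalizeWord(token)
--         for N, ngrams_ in corpus_NGram_counts.items():
--             for word_ngram in getCharacterNgrams(word, N):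
--                 if word_ngram in ngrams_:
--                     ngram_counts[word_ngram] += 1
--     return ngram_counts
-- ===== Notes on version B (the rewrite author's own statement) =====
-- stated objective: simpler
-- what changed: Replaces the self-recursive per-token calls and Counter-merging (Counter.update of a per-token Counter) with a single flat iterative loop over the tokens that increments one shared Counter directly.
import Mathlib
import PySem

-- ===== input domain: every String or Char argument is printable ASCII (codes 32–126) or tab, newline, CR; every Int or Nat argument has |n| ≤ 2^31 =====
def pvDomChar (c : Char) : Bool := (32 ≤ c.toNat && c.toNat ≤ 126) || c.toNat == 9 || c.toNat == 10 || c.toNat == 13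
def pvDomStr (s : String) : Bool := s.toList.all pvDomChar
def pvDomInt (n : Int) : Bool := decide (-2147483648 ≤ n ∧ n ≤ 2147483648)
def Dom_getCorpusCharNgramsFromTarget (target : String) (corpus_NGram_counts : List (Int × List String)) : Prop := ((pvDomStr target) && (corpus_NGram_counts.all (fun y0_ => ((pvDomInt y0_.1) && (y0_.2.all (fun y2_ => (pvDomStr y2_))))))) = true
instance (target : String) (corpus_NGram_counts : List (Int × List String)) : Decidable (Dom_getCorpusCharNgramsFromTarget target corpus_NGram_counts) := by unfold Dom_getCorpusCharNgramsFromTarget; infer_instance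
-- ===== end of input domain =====

-- B replaces A's self-recursion over tokens with per-token Counter merging by one flat loop over the
-- tokens of target.split(' ') incrementing a single shared counter; same return value (objective: simpler).

-- ===== PORT A =====
-- pvSplit1 is a structural model of PySem.Chars.splitOn with a one-character separator; it exists only
-- so that the recursion in the port of A can be proved terminating (pvToken_length_lt, cited in
-- decreasing_by). The port itself calls PySem.Chars.splitOn, the transliteration of str.split(sep).
def pvSplit1 (c : Char) : List Char → List Char → List (List Char)
  | [], cur => [cur.reverse]
  | x :: xs, cur => if x = c then cur.reverse :: pvSplit1 c xs [] else pvSplit1 c xs (x :: cur)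

theorem pvSplitOn_go_eq (c : Char) : ∀ (fuel : Nat) (l cur : List Char) (acc : List (List Char)),
    l.length < fuel →
    PySem.Chars.splitOn.go [c] fuel l cur acc = acc.reverse ++ pvSplit1 c l cur := by
  intro fuel
  induction fuel with
  | zero => intro l cur acc h; omega
  | succ fuel ih =>
    intro l cur acc h
    cases l with
    | nil => simp [PySem.Chars.splitOn.go, pvSplit1]
    | cons x xs =>
      have hpre : List.isPrefixOf [c] (x :: xs) = (c == x) := by simp [List.isPrefixOf]
      simp only [PySem.Chars.splitOn.go, hpre]
      by_cases hx : c = x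
      · subst hx
        simp only [beq_self_eq_true, if_true, List.drop_succ_cons, List.drop_zero,
          List.length_singleton]
        rw [ih xs [] (List.reverse cur :: acc) (by simp at h; omega)]
        simp [pvSplit1]
      · have hb : (c == x) = false := beq_eq_false_iff_ne.mpr hx
        have hxc : ¬ x = c := fun hh => hx hh.symm
        simp only [hb, Bool.false_eq_true, if_false]
        rw [ih xs (x :: cur) acc (by simp at h; omega)]
        simp [pvSplit1, hxc]

theorem pvSplitOn_eq_pvSplit1 (c : Char) (l : List Char) :
    PySem.Chars.splitOn l [c] = pvSplit1 c l [] := by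
  unfold PySem.Chars.splitOn
  rw [pvSplitOn_go_eq c (l.length + 1) l [] [] (by omega)]
  simp

theorem pvSplit1_length (c : Char) : ∀ (l cur : List Char), (pvSplit1 c l cur).length = l.count c + 1 := by
  intro l
  induction l with
  | nil => intro cur; simp [pvSplit1]
  | cons x xs ih =>
    intro cur
    by_cases hx : x = c
    · simp [pvSplit1, hx, ih, List.count_cons]
    · simp [pvSplit1, hx, ih, List.count_cons]

theorem pvSplit1_len_bound (c : Char) :
    ∀ (l cur t : List Char), t ∈ pvSplit1 c l cur → t.length + l.count c ≤ cur.length + l.length := by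
  intro l
  induction l with
  | nil => intro cur t ht; simp [pvSplit1] at ht; simp [ht]
  | cons x xs ih =>
    intro cur t ht
    by_cases hx : x = c
    · rw [pvSplit1, if_pos hx] at ht
      rcases List.mem_cons.1 ht with h1 | h1
      · subst h1
        have := List.count_le_length (l := xs) (a := c)
        simp [List.count_cons, hx]
        omega
      · have := ih [] t h1
        simp only [List.count_cons, hx] at *
        simp at this ⊢
        omega
    · rw [pvSplit1, if_neg hx] at ht
      have := ih (x :: cur) t ht
      have hxc : (x == c) = false := by simpa using hx
      simp [List.count_cons, hxc] at this ⊢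
      omega

-- the termination fact the recursion in the port of A cites
theorem pvToken_length_lt (target : String) (t : String)
    (ht : t ∈ (PySem.Chars.splitOn target.toList [' ']).map String.ofList)
    (hne : ¬ ((PySem.Chars.splitOn target.toList [' ']).map String.ofList).length = 1) :
    t.toList.length < target.toList.length := by
  rw [pvSplitOn_eq_pvSplit1] at ht hne
  obtain ⟨u, hu, rfl⟩ := List.mem_map.1 ht
  rw [String.toList_ofList]
  have h1 := pvSplit1_length ' ' target.toList []
  have h2 := pvSplit1_len_bound ' ' target.toList [] u hu
  have h3 := List.count_le_length (l := target.toList) (a := ' ')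
  simp only [List.length_map] at hne
  simp only [List.length_nil] at h2
  omega

def normalizeWord (word : String) : String := PySem.Str.lower word

def getNGramsPrefixesSuffixes (token : String) (index : Int) (N : Int) : List String :=
  -- token[index : index + N] is PySem.List.slice on the character list (exact Python slice)
  let sl : String := String.ofList (PySem.List.slice token.toList (some index) (some (index + N)))
  if index = 0 then
    ["PREFIX|__|" ++ sl, "AFFIX|__|" ++ sl]
  else if index = PySem.Str.len token - N then
    ["SUFFIX|__|" ++ sl, "AFFIX|__|" ++ sl]
  else
    ["AFFIX|__|" ++ sl]

def getCharacterNgrams (token : String) (N : Int) : PySem.Dict String Int :=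
  let word := normalizeWord token
  -- char_ngrams.update(list) is the counting loop 'd.modify g 0 (· + 1)' over the list's elements
  (PySem.List.pyRange 0 (PySem.Str.len word - N + 1) 1).foldl
    (fun d i => (getNGramsPrefixesSuffixes word i N).foldl (fun d g => d.modify g 0 (· + 1)) d)
    PySem.Dict.empty

-- ngram_counts.update(other_counter): add other's counts; new keys are appended in other's order
def pvCounterMerge (d c : PySem.Dict String Int) : PySem.Dict String Int :=
  c.items.foldl (fun d p => d.modify p.1 0 (· + p.2)) d

def getCorpusCharNgramsFromTargetC (target : String) (corpus_NGram_counts : List (Int × List String)) :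
    PySem.Dict String Int :=
  let tokens := (PySem.Chars.splitOn target.toList [' ']).map String.ofList   -- target.split(' ')
  let num_tokens := tokens.length
  if h : num_tokens = 1 then
    let word := normalizeWord (PySem.List.pyGetD tokens 0 "")                 -- tokens[0]
    let all_ngrams :=
      corpus_NGram_counts.foldl (fun acc p =>
        ((getCharacterNgrams word p.1).keys).foldl
          (fun acc g => if p.2.contains g then acc ++ [g] else acc) acc) []
    PySem.Dict.counter all_ngrams                            -- Counter(); ngram_counts.update(all_ngrams)
  else
    tokens.attach.foldl
      (fun d t => pvCounterMerge d (getCorpusCharNgramsFromTargetC t.1 corpus_NGram_counts))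
      PySem.Dict.empty
termination_by target.toList.length
decreasing_by
  exact pvToken_length_lt target _ t.2 h

def getCorpusCharNgramsFromTarget (target : String) (corpus_NGram_counts : List (Int × List String)) :
    List (String × Int) :=
  (getCorpusCharNgramsFromTargetC target corpus_NGram_counts).items

-- ===== PORT B =====
def getCorpusCharNgramsFromTarget_altC (target : String) (corpus_NGram_counts : List (Int × List String)) :
    PySem.Dict String Int :=
  ((PySem.Chars.splitOn target.toList [' ']).map String.ofList).foldl
    (fun d token =>
      let word := normalizeWord token
      corpus_NGram_counts.foldl
        (fun d p =>
          ((getCharacterNgrams word p.1).keys).foldl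
            (fun d g => if p.2.contains g then d.modify g 0 (· + 1) else d) d) d)
    PySem.Dict.empty

def getCorpusCharNgramsFromTarget_alt (target : String) (corpus_NGram_counts : List (Int × List String)) :
    List (String × Int) :=
  (getCorpusCharNgramsFromTarget_altC target corpus_NGram_counts).items

-- ===== PRECONDITION & SPEC =====
def Spec_getCorpusCharNgramsFromTarget (target : String) (corpus_NGram_counts : List (Int × List String)) (out : List (String × Int)) : Prop := out = getCorpusCharNgramsFromTarget_alt target corpus_NGram_counts
instance (target : String) (corpus_NGram_counts : List (Int × List String)) (out : List (String × Int)) : Decidable (Spec_getCorpusCharNgramsFromTarget target corpus_NGram_counts out) := by unfold Spec_getCorpusCharNgramsFromTarget; infer_instance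

-- ===== CLAIM (what is proved, stated in full; the proofs are below) =====
def Claim_equal_getCorpusCharNgramsFromTarget : Prop := ∀ (target : String) (corpus_NGram_counts : List (Int × List String)), Dom_getCorpusCharNgramsFromTarget target corpus_NGram_counts → Spec_getCorpusCharNgramsFromTarget target corpus_NGram_counts (getCorpusCharNgramsFromTarget target corpus_NGram_counts)

-- ===== LEMMAS AND PROOFS =====

theorem pvSplit1_no_sep (c : Char) :
    ∀ (l cur t : List Char), t ∈ pvSplit1 c l cur → c ∉ cur → c ∉ t := by
  intro l
  induction l with
  | nil =>
    intro cur t ht hc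
    simp [pvSplit1] at ht
    subst ht; simpa using hc
  | cons x xs ih =>
    intro cur t ht hc
    by_cases hx : x = c
    · rw [pvSplit1, if_pos hx] at ht
      rcases List.mem_cons.1 ht with h1 | h1
      · subst h1; simpa using hc
      · exact ih [] t h1 (by simp)
    · rw [pvSplit1, if_neg hx] at ht
      exact ih (x :: cur) t ht (by
        intro hmem
        rcases List.mem_cons.1 hmem with h1 | h1
        · exact hx h1.symm
        · exact hc h1)

theorem pvSplit1_of_no_sep (c : Char) :
    ∀ (l cur : List Char), c ∉ l → pvSplit1 c l cur = [cur.reverse ++ l] := by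
  intro l
  induction l with
  | nil => intro cur _; simp [pvSplit1]
  | cons x xs ih =>
    intro cur hc
    have hx : ¬ x = c := fun h => hc (by simp [h])
    rw [pvSplit1, if_neg hx, ih (x :: cur) (fun h => hc (by simp [h]))]
    simp

-- the per-token contribution: all corpus n-grams found in the token, as one flat list
def pvContrib (word : String) (corpus : List (Int × List String)) : List String :=
  corpus.flatMap (fun p => ((getCharacterNgrams word p.1).keys).filter (fun g => p.2.contains g))

-- A's all_ngrams loop builds exactly pvContrib
theorem pvAllNgrams_eq (word : String) (corpus : List (Int × List String)) :
    corpus.foldl (fun acc p =>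
        ((getCharacterNgrams word p.1).keys).foldl
          (fun acc g => if p.2.contains g then acc ++ [g] else acc) acc) [] =
      pvContrib word corpus := by
  unfold pvContrib
  simp only [PySem.List.foldl_append_if_eq_filter]
  rw [PySem.List.foldl_append_eq_flatMap
    (fun p => ((getCharacterNgrams word p.1).keys).filter (fun g => p.2.contains g)) corpus []]
  simp only [List.nil_append]

-- B's per-token body is the counting loop over pvContrib
theorem pvInnerB_eq (word : String) (corpus : List (Int × List String)) (d : PySem.Dict String Int) :
    corpus.foldl
        (fun d p =>
          ((getCharacterNgrams word p.1).keys).foldl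
            (fun d g => if p.2.contains g then d.modify g 0 (· + 1) else d) d) d =
      (pvContrib word corpus).foldl (fun d g => d.modify g 0 (· + 1)) d := by
  unfold pvContrib
  simp only [PySem.List.foldl_if_eq_foldl_filter]
  rw [List.foldl_flatMap]

theorem pvGetD_foldl_modify_nodup (f : String → Int) :
    ∀ (ks : List String) (d : PySem.Dict String Int) (k : String), ks.Nodup →
      (ks.foldl (fun d x => d.modify x 0 (fun v => v + f x)) d).getD k 0 =
        d.getD k 0 + (if k ∈ ks then f k else 0) := by
  intro ks
  induction ks with
  | nil => intro d k _; simp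
  | cons x xs ih =>
    intro d k hnd
    simp only [List.foldl_cons]
    rw [ih _ k hnd.of_cons]
    rw [PySem.Dict.getD_modify]
    by_cases hk : k = x
    · subst hk
      have : k ∉ xs := (List.nodup_cons.1 hnd).1
      simp [this]
    · simp [hk, List.mem_cons]

-- merging a list's Counter into d = running the per-element counting loop for the list on d
theorem pvCounterMerge_counter (d : PySem.Dict String Int) (hd : d.keys.Nodup) (l : List String) :
    pvCounterMerge d (PySem.Dict.counter l) = l.foldl (fun d g => d.modify g 0 (· + 1)) d := by
  unfold pvCounterMerge
  rw [PySem.Dict.items_counter, List.foldl_map]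
  have hnL : ((PySem.Set.ofList l : List String).foldl
      (fun d k => d.modify k 0 (fun v => v + (l.count k : Int))) d).keys.Nodup :=
    PySem.Dict.nodup_keys_foldl_modify_key _ (fun x => x) 0
      (fun _ k => fun v => v + (l.count k : Int)) d hd
  have hnR : (l.foldl (fun d g => d.modify g 0 (· + 1)) d).keys.Nodup :=
    PySem.Dict.nodup_keys_foldl_modify_key _ (fun x => x) 0 (fun _ _ => fun v => v + 1) d hd
  apply PySem.Dict.ext
  rw [PySem.Dict.items_eq_map_keys _ hnL 0, PySem.Dict.items_eq_map_keys _ hnR 0]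
  rw [PySem.Dict.keys_foldl_modify, PySem.Dict.keys_foldl_modify,
    PySem.Set.update_eq_append_filter, PySem.Set.update_eq_append_filter, PySem.Set.ofList_ofList]
  apply List.map_congr_left
  intro k _
  rw [pvGetD_foldl_modify_nodup _ _ d k (PySem.Set.nodup_ofList l),
    PySem.Dict.getD_foldl_modify_add_one]
  by_cases hm : k ∈ l
  · simp [PySem.Set.mem_ofList, hm]
  · simp [PySem.Set.mem_ofList, hm, List.count_eq_zero.2 hm]

-- any token of target.split(' ') splits to itself (it contains no separator)
theorem pvToken_split (target : String) (t : String)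
    (ht : t ∈ (PySem.Chars.splitOn target.toList [' ']).map String.ofList) :
    (PySem.Chars.splitOn t.toList [' ']).map String.ofList = [t] := by
  obtain ⟨u, hu, rfl⟩ := List.mem_map.1 ht
  rw [String.toList_ofList, pvSplitOn_eq_pvSplit1]
  rw [pvSplitOn_eq_pvSplit1] at hu
  have hn : ' ' ∉ u := pvSplit1_no_sep ' ' _ _ _ hu (by simp)
  rw [pvSplit1_of_no_sep ' ' u [] hn]
  simp

-- A on an input that splits to a single token is the Counter of its contribution list
theorem pvBase (t : String) (corpus : List (Int × List String)) (w : String)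
    (h1 : (PySem.Chars.splitOn t.toList [' ']).map String.ofList = [w]) :
    getCorpusCharNgramsFromTargetC t corpus =
      PySem.Dict.counter (pvContrib (normalizeWord w) corpus) := by
  rw [getCorpusCharNgramsFromTargetC]
  simp only [h1, List.length_singleton, PySem.List.pyGetD_zero_cons, dif_pos]
  rw [pvAllNgrams_eq]

theorem pvMergeFold (g : String → List String) (corpus : List (Int × List String)) :
    ∀ (ts : List String) (d : PySem.Dict String Int), d.keys.Nodup →
      ts.foldl (fun d t => pvCounterMerge d (PySem.Dict.counter (g t))) d =
        ts.foldl (fun d t => (g t).foldl (fun d x => d.modify x 0 (· + 1)) d) d := by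
  intro ts
  induction ts with
  | nil => intro d _; rfl
  | cons t ts ih =>
    intro d hd
    simp only [List.foldl_cons]
    rw [pvCounterMerge_counter d hd (g t),
      ih _ (PySem.Dict.nodup_keys_foldl_modify_key _ (fun x => x) 0 (fun _ _ => fun v => v + 1) d hd)]

theorem pvMain (target : String) (corpus : List (Int × List String)) :
    getCorpusCharNgramsFromTargetC target corpus = getCorpusCharNgramsFromTarget_altC target corpus := by
  by_cases h : ((PySem.Chars.splitOn target.toList [' ']).map String.ofList).length = 1
  · obtain ⟨t0, ht0⟩ := List.length_eq_one_iff.mp h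
    rw [pvBase target corpus t0 ht0]
    unfold getCorpusCharNgramsFromTarget_altC
    rw [ht0]
    simp only [List.foldl_cons, List.foldl_nil]
    rw [pvInnerB_eq, PySem.Dict.counter_eq_foldl]
  · rw [getCorpusCharNgramsFromTargetC]
    simp only []
    rw [dif_neg h]
    unfold getCorpusCharNgramsFromTarget_altC
    rw [PySem.List.foldl_congr_mem _ _
      (fun d (t : {x // x ∈ (PySem.Chars.splitOn target.toList [' ']).map String.ofList}) =>
        pvCounterMerge d (PySem.Dict.counter (pvContrib (normalizeWord t.1) corpus))) _
      (by
        intro acc t _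
        rw [pvBase t.1 corpus t.1 (pvToken_split target t.1 t.2)])]
    rw [List.foldl_attach
      (f := fun d w => pvCounterMerge d (PySem.Dict.counter (pvContrib (normalizeWord w) corpus)))]
    rw [pvMergeFold (fun t => pvContrib (normalizeWord t) corpus) corpus _ _ PySem.Dict.nodup_keys_empty]
    refine Eq.symm (PySem.List.foldl_congr_mem _ _ _ _ ?_)
    intro acc x _
    exact pvInnerB_eq (normalizeWord x) corpus acc

-- ===== VERDICT (by name: the statement is the Claim_ definition above) =====
theorem getCorpusCharNgramsFromTarget_spec : Claim_equal_getCorpusCharNgramsFromTarget := by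
  intro target corpus _
  unfold Spec_getCorpusCharNgramsFromTarget getCorpusCharNgramsFromTarget getCorpusCharNgramsFromTarget_alt
  rw [pvMain]
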